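-- pv_equiv track=rewrite | github.com/GlebMoskalev/dt-notibot | bot/hanlders/schedule.py | __parse_orgnizers
-- ===== SOURCE A (Python) =====
-- from typing import List
--
-- def __parse_orgnizers(orgs: str) -> List[str]:
--     orgs = orgs.strip()
--     while '  ' in orgs:
--         orgs = orgs.replace('  ', ' ')
--     while ', ' in orgs:
--         orgs = orgs.replace(', ', ',')
--     while ' ,' in orgs:
--         orgs = orgs.replace(' ,', ',')
--     return orgs.split(',')
-- ===== SOURCE B (Python) =====
-- from typing import List
--
--
-- def __parse_orgnizers(orgs: str) -> List[str]:
--     result = []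
--     tok = ''
--     pending = False
--     for ch in orgs.strip():
--         if ch == ',':
--             result.append(tok)
--             tok = ''
--             pending = False
--         elif ch == ' ':
--             if tok:
--                 pending = True
--         else:
--             if pending:
--                 tok += ' '
--                 pending = False
--             tok += ch
--     result.append(tok)
--     return result
-- ===== Notes on version B (the rewrite author's own statement) =====
-- stated objective: alternative
-- what changed: B replaces A's staged fixpoint replace-loops over the whole string (collapse double spaces, then delete spaces after commas, then before commas, then split) by a single left-to-right character scan with an accumulator (current token plus a pending-space flag) that splits on commas and normalizes spaces on the fly.
import Mathlib
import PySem

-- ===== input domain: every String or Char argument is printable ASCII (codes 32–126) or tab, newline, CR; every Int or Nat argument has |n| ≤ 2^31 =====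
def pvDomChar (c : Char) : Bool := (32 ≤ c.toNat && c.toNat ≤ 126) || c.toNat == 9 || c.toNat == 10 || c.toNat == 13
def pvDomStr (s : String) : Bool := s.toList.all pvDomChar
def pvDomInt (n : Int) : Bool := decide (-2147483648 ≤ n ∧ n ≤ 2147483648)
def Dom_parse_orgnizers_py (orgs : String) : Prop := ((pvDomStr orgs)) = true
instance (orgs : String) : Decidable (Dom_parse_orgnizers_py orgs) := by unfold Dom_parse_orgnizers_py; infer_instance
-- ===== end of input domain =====

-- B replaces A's staged whole-string fixpoint replace loops by one left-to-right scan
-- (token accumulator + pending-space flag); objective: alternative.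

-- ===== PORT A =====
-- pvRep a b r is s.replace(ab, r) for a two-char pattern, written structurally; it is proved
-- equal to PySem.Chars.replace below.  It is placed before the ports only because the
-- termination of A's 'while pat in s: s = s.replace(pat, r)' loops rests on it.
def pvRep (a b r : Char) : List Char → List Char
  | [] => []
  | [c] => [c]
  | c :: d :: t => if c = a ∧ d = b then r :: pvRep a b r t else c :: pvRep a b r (d :: t)

theorem pvPairInfix (a b c : Char) (t : List Char) :
    [a, b] <:+: (c :: t) ↔ (c = a ∧ t.head? = some b) ∨ [a, b] <:+: t := by
  rw [List.infix_cons_iff]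
  constructor
  · rintro (h | h)
    · cases t with
      | nil => rcases h with ⟨u, hu⟩; simp at hu
      | cons d t' =>
        rw [List.cons_prefix_cons, List.cons_prefix_cons] at h
        exact Or.inl ⟨h.1.symm, by simp [h.2.1]⟩
    · exact Or.inr h
  · rintro (⟨rfl, h⟩ | h)
    · cases t with
      | nil => simp at h
      | cons d t' =>
        simp at h
        exact Or.inl (by simp [List.cons_prefix_cons, h])
    · exact Or.inr h

theorem pvRep_length_le (a b r : Char) (v : List Char) : (pvRep a b r v).length ≤ v.length := by
  fun_induction pvRep <;> simp_all <;> omega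

theorem pvRep_length_lt (a b r : Char) (v : List Char) (h : [a, b] <:+: v) :
    (pvRep a b r v).length < v.length := by
  fun_induction pvRep with
  | case1 => simp at h
  | case2 c =>
    exfalso
    rcases (pvPairInfix a b c []).mp h with ⟨_, h2⟩ | h2 <;> simp at h2
  | case3 c d t hm ih =>
    have := pvRep_length_le a b r t
    simp only [List.length_cons]
    omega
  | case4 c d t hm ih =>
    rcases (pvPairInfix a b c (d :: t)).mp h with ⟨rfl, h2⟩ | h2
    · simp at h2; exact absurd ⟨rfl, h2⟩ hm
    · have := ih h2
      simp only [List.length_cons] at *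
      omega

theorem pvGoZero (old new l acc : List Char) :
    PySem.Chars.replace.go old new 0 l acc = acc.reverse ++ l := by
  rw [PySem.Chars.replace.go]

theorem pvGoSuccNil (old new : List Char) (fuel : Nat) (acc : List Char) :
    PySem.Chars.replace.go old new (fuel + 1) [] acc = acc.reverse := by
  rw [PySem.Chars.replace.go]
  exact fun h => absurd h (Nat.succ_ne_zero fuel)

theorem pvGoSuccCons (old new : List Char) (fuel : Nat) (c : Char) (t acc : List Char) :
    PySem.Chars.replace.go old new (fuel + 1) (c :: t) acc =
      if old.isPrefixOf (c :: t) then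
        PySem.Chars.replace.go old new fuel (List.drop old.length (c :: t)) (new.reverse ++ acc)
      else PySem.Chars.replace.go old new fuel t (c :: acc) := by
  rw [PySem.Chars.replace.go]

theorem pvReplaceGo_eq (a b r : Char) (fuel : Nat) (l acc : List Char) (hf : l.length ≤ fuel) :
    PySem.Chars.replace.go [a, b] [r] fuel l acc = acc.reverse ++ pvRep a b r l := by
  induction fuel generalizing l acc with
  | zero =>
    have hl : l = [] := by cases l <;> simp_all
    subst hl
    rw [pvGoZero]; simp [pvRep]
  | succ fuel ih =>
    cases l with
    | nil => rw [pvGoSuccNil]; simp [pvRep]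
    | cons c t =>
      rw [pvGoSuccCons]
      cases t with
      | nil =>
        have hp : List.isPrefixOf [a, b] [c] = false := by
          rw [Bool.eq_false_iff]
          intro hp
          rw [List.isPrefixOf_iff_prefix] at hp
          rcases hp with ⟨u, hu⟩; simp at hu
        rw [hp]
        simp only [Bool.false_eq_true, if_false]
        rw [ih [] _ (by simp)]
        simp [pvRep]
      | cons d t' =>
        by_cases hm : c = a ∧ d = b
        · obtain ⟨rfl, rfl⟩ := hm
          have hp : List.isPrefixOf [c, d] (c :: d :: t') = true := by
            rw [List.isPrefixOf_iff_prefix, List.cons_prefix_cons, List.cons_prefix_cons]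
            exact ⟨rfl, rfl, by simp⟩
          rw [hp, if_pos rfl]
          rw [show List.drop ([c, d] : List Char).length (c :: d :: t') = t' from rfl]
          rw [ih t' _ (by simp only [List.length_cons] at hf ⊢; omega)]
          simp [pvRep]
        · have hp : List.isPrefixOf [a, b] (c :: d :: t') = false := by
            rw [Bool.eq_false_iff]
            intro hp
            rw [List.isPrefixOf_iff_prefix, List.cons_prefix_cons, List.cons_prefix_cons] at hp
            exact hm ⟨hp.1.symm, hp.2.1.symm⟩
          rw [hp]
          simp only [Bool.false_eq_true, if_false]
          rw [ih (d :: t') _ (by simp only [List.length_cons] at hf ⊢; omega)]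
          simp [pvRep, hm]

theorem pvReplace_eq (a b r : Char) (s : List Char) :
    PySem.Chars.replace s [a, b] [r] = pvRep a b r s := by
  have h := pvReplaceGo_eq a b r s.length s [] le_rfl
  rw [PySem.Chars.replace]
  simpa using h

theorem pvReplace_length_lt (a b r : Char) (s : List Char)
    (h : PySem.Chars.isIn [a, b] s = true) :
    (PySem.Chars.replace s [a, b] [r]).length < s.length := by
  rw [pvReplace_eq]
  exact pvRep_length_lt a b r s ((PySem.Chars.isIn_iff_infix _ _).mp h)

-- A's 'while old in s: s = s.replace(old, new)' loop, for a two-char old and one-char new.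
def pvWhileReplace (a b r : Char) (s : List Char) : List Char :=
  if h : PySem.Chars.isIn [a, b] s = true then
    pvWhileReplace a b r (PySem.Chars.replace s [a, b] [r])
  else s
termination_by s.length
decreasing_by exact pvReplace_length_lt a b r s h

def parse_orgnizers_py (orgs : String) : List String :=
  let s0 := PySem.Chars.strip orgs.toList
  let s1 := pvWhileReplace ' ' ' ' ' ' s0       -- while '  ' in orgs: orgs = orgs.replace('  ', ' ')
  let s2 := pvWhileReplace ',' ' ' ',' s1       -- while ', ' in orgs: orgs = orgs.replace(', ', ',')
  let s3 := pvWhileReplace ' ' ',' ',' s2       -- while ' ,' in orgs: orgs = orgs.replace(' ,', ',')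
  (PySem.Chars.splitOn s3 [',']).map String.mk

-- ===== PORT B =====
-- B's single pass: for ch in orgs.strip(): … with state (result, tok, pending).
def pvScan (s : List Char) (tok : List Char) (pending : Bool) (res : List String) : List String :=
  match s with
  | [] => res ++ [String.mk tok]
  | c :: rest =>
    if c = ',' then pvScan rest [] false (res ++ [String.mk tok])
    else if c = ' ' then
      (if tok ≠ [] then pvScan rest tok true res else pvScan rest tok pending res)
    else if pending then pvScan rest (tok ++ [' ', c]) false res
    else pvScan rest (tok ++ [c]) false res

def parse_orgnizers_py_alt (orgs : String) : List String :=
  pvScan (PySem.Chars.strip orgs.toList) [] false []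

-- ===== PRECONDITION & SPEC =====
def Spec_parse_orgnizers_py (orgs : String) (out : List String) : Prop := out = parse_orgnizers_py_alt orgs
instance (orgs : String) (out : List String) : Decidable (Spec_parse_orgnizers_py orgs out) := by unfold Spec_parse_orgnizers_py; infer_instance

-- ===== CLAIM (what is proved, stated in full; the proofs are below) =====
def Claim_equal_parse_orgnizers_py : Prop := ∀ (orgs : String), Dom_parse_orgnizers_py orgs → Spec_parse_orgnizers_py orgs (parse_orgnizers_py orgs)

-- ===== LEMMAS AND PROOFS =====

-- split on ',' written structurally
def pvAddHead (p : List Char) : List (List Char) → List (List Char)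
  | [] => []
  | h :: tl => (p ++ h) :: tl

def pvSplitc : List Char → List (List Char)
  | [] => [[]]
  | c :: t => if c = ',' then [] :: pvSplitc t else pvAddHead [c] (pvSplitc t)

-- collapse runs of spaces (keeping the last space of each run)
def pvSqueeze : List Char → List Char
  | [] => []
  | [c] => [c]
  | c :: d :: t => if c = ' ' ∧ d = ' ' then pvSqueeze (d :: t) else c :: pvSqueeze (d :: t)

def pvDropLead (l : List Char) : List Char := l.dropWhile (fun c => List.contains [' '] c)
def pvDropTrail (l : List Char) : List Char := (pvDropLead l.reverse).reverse

theorem pvSpIff (c : Char) : (List.contains [' '] c = true) ↔ c = ' ' := by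
  constructor
  · intro h
    have : c ∈ [' '] := List.mem_of_elem_eq_true h
    simpa using this
  · rintro rfl
    exact List.elem_eq_true_of_mem (by simp)

theorem pvSplitc_ne_nil (v : List Char) : pvSplitc v ≠ [] := by
  induction v with
  | nil => simp [pvSplitc]
  | cons c t ih =>
    simp only [pvSplitc]
    split
    · simp
    · rcases h : pvSplitc t with _ | ⟨h', tl⟩
      · exact absurd h ih
      · simp [pvAddHead]

theorem pvSplitcCons (c : Char) (t : List Char) (hc : ¬ c = ',') :
    pvSplitc (c :: t) = pvAddHead [c] (pvSplitc t) := by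
  simp [pvSplitc, hc]

theorem pvSplitcComma (t : List Char) : pvSplitc (',' :: t) = [] :: pvSplitc t := by
  simp [pvSplitc]

theorem pvSGoSuccNil (sep : List Char) (fuel : Nat) (cur : List Char) (acc : List (List Char)) :
    PySem.Chars.splitOn.go sep (fuel + 1) [] cur acc = (cur.reverse :: acc).reverse := by
  rw [PySem.Chars.splitOn.go]
  exact fun h => absurd h (Nat.succ_ne_zero fuel)

theorem pvSGoSuccCons (sep : List Char) (fuel : Nat) (c : Char) (rest cur : List Char)
    (acc : List (List Char)) :
    PySem.Chars.splitOn.go sep (fuel + 1) (c :: rest) cur acc =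
      if sep.isPrefixOf (c :: rest) then
        PySem.Chars.splitOn.go sep fuel (List.drop sep.length (c :: rest)) [] (cur.reverse :: acc)
      else PySem.Chars.splitOn.go sep fuel rest (c :: cur) acc := by
  rw [PySem.Chars.splitOn.go]

theorem pvSplitOnGo_eq (fuel : Nat) (l cur : List Char) (acc : List (List Char))
    (hf : l.length < fuel) :
    PySem.Chars.splitOn.go [','] fuel l cur acc =
      acc.reverse ++ pvAddHead cur.reverse (pvSplitc l) := by
  induction fuel generalizing l cur acc with
  | zero => omega
  | succ fuel ih =>
    cases l with
    | nil => rw [pvSGoSuccNil]; simp [pvSplitc, pvAddHead]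
    | cons c rest =>
      rw [pvSGoSuccCons]
      by_cases hc : c = ','
      · subst hc
        have hp : List.isPrefixOf [','] (',' :: rest) = true := by
          rw [List.isPrefixOf_iff_prefix, List.cons_prefix_cons]
          exact ⟨rfl, by simp⟩
        rw [hp, if_pos rfl]
        rw [show List.drop ([','] : List Char).length (',' :: rest) = rest from rfl]
        rw [ih _ _ _ (by simp only [List.length_cons] at hf ⊢; omega)]
        rcases hsp : pvSplitc rest with _ | ⟨h0, tl0⟩
        · exact absurd hsp (pvSplitc_ne_nil rest)
        · simp [pvSplitcComma, pvAddHead, hsp]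
      · have hp : List.isPrefixOf [','] (c :: rest) = false := by
          rw [Bool.eq_false_iff]
          intro hpp
          rw [List.isPrefixOf_iff_prefix, List.cons_prefix_cons] at hpp
          exact hc hpp.1.symm
        rw [hp]
        simp only [Bool.false_eq_true, if_false]
        rw [ih _ _ _ (by simp only [List.length_cons] at hf ⊢; omega)]
        rcases hsp : pvSplitc rest with _ | ⟨h0, tl0⟩
        · exact absurd hsp (pvSplitc_ne_nil rest)
        · simp [pvSplitcCons c rest hc, pvAddHead, hsp]

theorem pvSplitOn_eq (s : List Char) : PySem.Chars.splitOn s [','] = pvSplitc s := by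
  rw [PySem.Chars.splitOn]
  rw [pvSplitOnGo_eq _ _ _ _ (by omega)]
  rcases hs : pvSplitc s with _ | ⟨h0, tl0⟩
  · exact absurd hs (pvSplitc_ne_nil s)
  · simp [pvAddHead]

theorem pvRep_head? (a b r : Char) (v : List Char) (x : Char)
    (h : (pvRep a b r v).head? = some x) : (x = r ∧ v.head? = some a) ∨ v.head? = some x := by
  fun_induction pvRep a b r v with
  | case1 => simp at h
  | case2 c => simp at h; simp [h]
  | case3 c d t hm ih =>
    simp only [List.head?_cons, Option.some.injEq] at h
    exact Or.inl ⟨h.symm, by simp [hm.1]⟩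
  | case4 c d t hm ih =>
    simp only [List.head?_cons, Option.some.injEq] at h
    exact Or.inr (by simp [h])

theorem pvInfixTail (a b c : Char) (t : List Char) (h : ¬ [a, b] <:+: (c :: t)) :
    ¬ [a, b] <:+: t :=
  fun h2 => h ((pvPairInfix a b c t).mpr (Or.inr h2))

theorem pvPairNotSingleton (a b c : Char) : ¬ [a, b] <:+: [c] := by
  intro h
  rcases (pvPairInfix a b c []).mp h with ⟨_, h2⟩ | h2 <;> simp at h2

theorem pvRep_self (a b r : Char) (v : List Char) (h : ¬ [a, b] <:+: v) :
    pvRep a b r v = v := by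
  fun_induction pvRep a b r v with
  | case1 => rfl
  | case2 c => rfl
  | case3 c d t hm ih =>
    exact absurd ((pvPairInfix a b c (d :: t)).mpr (Or.inl ⟨hm.1, by simp [hm.2]⟩)) h
  | case4 c d t hm ih =>
    rw [ih (pvInfixTail a b c (d :: t) h)]

theorem pvSqueeze_head? (v : List Char) : (pvSqueeze v).head? = v.head? := by
  fun_induction pvSqueeze v with
  | case1 => rfl
  | case2 c => rfl
  | case3 c d t hm ih => rw [ih]; simp [hm.1, hm.2]
  | case4 c d t hm ih => simp

theorem pvSqueeze_getLast? (v : List Char) : (pvSqueeze v).getLast? = v.getLast? := by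
  fun_induction pvSqueeze v with
  | case1 => rfl
  | case2 c => rfl
  | case3 c d t hm ih => rw [ih, List.getLast?_cons_cons]
  | case4 c d t hm ih =>
    rcases he : pvSqueeze (d :: t) with _ | ⟨e, es⟩
    · have := pvSqueeze_head? (d :: t)
      rw [he] at this; simp at this
    · rw [List.getLast?_cons_cons, ← he, ih, List.getLast?_cons_cons]

theorem pvSqueeze_cons (c : Char) (x : List Char) :
    pvSqueeze (c :: x) =
      if c = ' ' ∧ x.head? = some ' ' then pvSqueeze x else c :: pvSqueeze x := by
  cases x with
  | nil => simp [pvSqueeze]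
  | cons d t => simp only [pvSqueeze, List.head?_cons, Option.some.injEq]

theorem pvRepSS_head? (u : List Char) : (pvRep ' ' ' ' ' ' u).head? = u.head? := by
  fun_induction pvRep ' ' ' ' ' ' u with
  | case1 => rfl
  | case2 c => rfl
  | case3 c d t hm ih => simp [hm.1]
  | case4 c d t hm ih => simp

theorem pvSqueeze_rep (v : List Char) : pvSqueeze (pvRep ' ' ' ' ' ' v) = pvSqueeze v := by
  fun_induction pvRep ' ' ' ' ' ' v with
  | case1 => rfl
  | case2 c => rfl
  | case3 c d t hm ih =>
    obtain ⟨rfl, rfl⟩ := hm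
    rw [pvSqueeze_cons, pvRepSS_head? t, ih]
    rw [show pvSqueeze (' ' :: ' ' :: t) = pvSqueeze (' ' :: t) from by simp [pvSqueeze]]
    rw [pvSqueeze_cons]
  | case4 c d t hm ih =>
    rw [pvSqueeze_cons, pvRepSS_head? (d :: t), ih]
    rw [show pvSqueeze (c :: d :: t) =
        if c = ' ' ∧ d = ' ' then pvSqueeze (d :: t) else c :: pvSqueeze (d :: t) from rfl]
    simp only [List.head?_cons, Option.some.injEq]

theorem pvNodd_squeeze (v : List Char) : ¬ [' ', ' '] <:+: pvSqueeze v := by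
  fun_induction pvSqueeze v with
  | case1 => simp
  | case2 c => exact pvPairNotSingleton _ _ _
  | case3 c d t hm ih => exact ih
  | case4 c d t hm ih =>
    intro h
    rcases (pvPairInfix ' ' ' ' c (pvSqueeze (d :: t))).mp h with ⟨rfl, h2⟩ | h2
    · rw [pvSqueeze_head?] at h2
      cases t with
      | nil => simp at h2; exact hm ⟨rfl, h2⟩
      | cons e t' => simp at h2; exact hm ⟨rfl, h2⟩
    · exact ih h2

theorem pvSqueeze_self (v : List Char) (h : ¬ [' ', ' '] <:+: v) : pvSqueeze v = v := by
  fun_induction pvSqueeze v with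
  | case1 => rfl
  | case2 c => rfl
  | case3 c d t hm ih =>
    exact absurd ((pvPairInfix ' ' ' ' c (d :: t)).mpr (Or.inl ⟨hm.1, by simp [hm.2]⟩)) h
  | case4 c d t hm ih =>
    rw [ih (pvInfixTail ' ' ' ' c (d :: t) h)]

theorem pvLoop1_eq (s : List Char) : pvWhileReplace ' ' ' ' ' ' s = pvSqueeze s := by
  fun_induction pvWhileReplace ' ' ' ' ' ' s with
  | case1 s h ih =>
    rw [ih, pvReplace_eq, pvSqueeze_rep]
  | case2 s h =>
    exact (pvSqueeze_self s ((PySem.Chars.isIn_eq_false_iff _ _).mp (by simpa using h))).symm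

theorem pvNodd_repCS (v : List Char) (h : ¬ [' ', ' '] <:+: v) :
    ¬ [' ', ' '] <:+: pvRep ',' ' ' ',' v := by
  fun_induction pvRep ',' ' ' ',' v with
  | case1 => simp
  | case2 c => exact pvPairNotSingleton _ _ _
  | case3 c d t hm ih =>
    obtain ⟨rfl, rfl⟩ := hm
    intro hc
    rcases (pvPairInfix ' ' ' ' ',' _).mp hc with ⟨h1, _⟩ | h2
    · exact absurd h1 (by decide)
    · exact ih (pvInfixTail _ _ _ _ (pvInfixTail _ _ _ _ h)) h2
  | case4 c d t hm ih =>
    intro hc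
    rcases (pvPairInfix ' ' ' ' c _).mp hc with ⟨rfl, h2⟩ | h2
    · rcases pvRep_head? _ _ _ _ _ h2 with ⟨he, _⟩ | hh
      · exact absurd he (by decide)
      · simp only [List.head?_cons, Option.some.injEq] at hh
        exact h ((pvPairInfix ' ' ' ' ' ' (d :: t)).mpr (Or.inl ⟨rfl, by simp [hh]⟩))
    · exact ih (pvInfixTail _ _ _ _ h) h2

theorem pvNoCS_repCS (v : List Char) (h : ¬ [' ', ' '] <:+: v) :
    ¬ [',', ' '] <:+: pvRep ',' ' ' ',' v := by
  fun_induction pvRep ',' ' ' ',' v with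
  | case1 => simp
  | case2 c => exact pvPairNotSingleton _ _ _
  | case3 c d t hm ih =>
    obtain ⟨rfl, rfl⟩ := hm
    intro hc
    rcases (pvPairInfix ',' ' ' ',' _).mp hc with ⟨_, h2⟩ | h2
    · rcases pvRep_head? _ _ _ _ _ h2 with ⟨he, _⟩ | hh
      · exact absurd he (by decide)
      · exact h ((pvPairInfix ' ' ' ' ',' (' ' :: t)).mpr
          (Or.inr ((pvPairInfix ' ' ' ' ' ' t).mpr (Or.inl ⟨rfl, hh⟩))))
    · exact ih (pvInfixTail _ _ _ _ (pvInfixTail _ _ _ _ h)) h2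
  | case4 c d t hm ih =>
    intro hc
    rcases (pvPairInfix ',' ' ' c _).mp hc with ⟨rfl, h2⟩ | h2
    · rcases pvRep_head? _ _ _ _ _ h2 with ⟨he, _⟩ | hh
      · exact absurd he (by decide)
      · simp only [List.head?_cons, Option.some.injEq] at hh
        exact hm ⟨rfl, hh⟩
    · exact ih (pvInfixTail _ _ _ _ h) h2

theorem pvNoSC_repSC (v : List Char) (h : ¬ [' ', ' '] <:+: v) :
    ¬ [' ', ','] <:+: pvRep ' ' ',' ',' v := by
  fun_induction pvRep ' ' ',' ',' v with
  | case1 => simp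
  | case2 c => exact pvPairNotSingleton _ _ _
  | case3 c d t hm ih =>
    obtain ⟨rfl, rfl⟩ := hm
    intro hc
    rcases (pvPairInfix ' ' ',' ',' _).mp hc with ⟨h1, _⟩ | h2
    · exact absurd h1 (by decide)
    · exact ih (pvInfixTail _ _ _ _ (pvInfixTail _ _ _ _ h)) h2
  | case4 c d t hm ih =>
    intro hc
    rcases (pvPairInfix ' ' ',' c _).mp hc with ⟨rfl, h2⟩ | h2
    · rcases pvRep_head? _ _ _ _ _ h2 with ⟨_, hh⟩ | hh
      · simp only [List.head?_cons, Option.some.injEq] at hh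
        exact h ((pvPairInfix ' ' ' ' ' ' (d :: t)).mpr (Or.inl ⟨rfl, by simp [hh]⟩))
      · simp only [List.head?_cons, Option.some.injEq] at hh
        exact hm ⟨rfl, hh⟩
    · exact ih (pvInfixTail _ _ _ _ h) h2

theorem pvLoop2_eq (s : List Char) (h : ¬ [' ', ' '] <:+: s) :
    pvWhileReplace ',' ' ' ',' s = pvRep ',' ' ' ',' s := by
  by_cases hin : PySem.Chars.isIn [',', ' '] s = true
  · rw [pvWhileReplace, dif_pos hin, pvReplace_eq]
    have h2 : ¬ (PySem.Chars.isIn [',', ' '] (pvRep ',' ' ' ',' s) = true) := by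
      rw [(PySem.Chars.isIn_eq_false_iff _ _).mpr (pvNoCS_repCS s h)]
      simp
    rw [pvWhileReplace, dif_neg h2]
  · rw [pvWhileReplace, dif_neg hin]
    exact (pvRep_self ',' ' ' ',' s ((PySem.Chars.isIn_eq_false_iff _ _).mp (by simpa using hin))).symm

theorem pvLoop3_eq (s : List Char) (h : ¬ [' ', ' '] <:+: s) :
    pvWhileReplace ' ' ',' ',' s = pvRep ' ' ',' ',' s := by
  by_cases hin : PySem.Chars.isIn [' ', ','] s = true
  · rw [pvWhileReplace, dif_pos hin, pvReplace_eq]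
    have h2 : ¬ (PySem.Chars.isIn [' ', ','] (pvRep ' ' ',' ',' s) = true) := by
      rw [(PySem.Chars.isIn_eq_false_iff _ _).mpr (pvNoSC_repSC s h)]
      simp
    rw [pvWhileReplace, dif_neg h2]
  · rw [pvWhileReplace, dif_neg hin]
    exact (pvRep_self ' ' ',' ',' s ((PySem.Chars.isIn_eq_false_iff _ _).mp (by simpa using hin))).symm

theorem pvSplitc_squeeze (v : List Char) :
    pvSplitc (pvSqueeze v) = (pvSplitc v).map pvSqueeze := by
  fun_induction pvSqueeze v with
  | case1 => simp [pvSqueeze, pvSplitc]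
  | case2 c => by_cases hc : c = ',' <;> simp [pvSqueeze, pvSplitc, pvAddHead, hc]
  | case3 c d t hm ih =>
    obtain ⟨rfl, rfl⟩ := hm
    rw [ih]
    rcases hsp : pvSplitc t with _ | ⟨h0, tl0⟩
    · exact absurd hsp (pvSplitc_ne_nil t)
    · rw [pvSplitcCons ' ' (' ' :: t) (by decide), pvSplitcCons ' ' t (by decide), hsp]
      simp only [pvAddHead, List.map_cons, List.singleton_append]
      rw [show pvSqueeze (' ' :: ' ' :: h0) = pvSqueeze (' ' :: h0) from by simp [pvSqueeze]]
  | case4 c d t hm ih =>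
    by_cases hc : c = ','
    · subst hc
      rw [show pvSplitc (',' :: pvSqueeze (d :: t)) = [] :: pvSplitc (pvSqueeze (d :: t)) from
          pvSplitcComma _]
      rw [ih, pvSplitcComma (d :: t)]
      simp [show pvSqueeze [] = [] from rfl]
    · rcases hsp : pvSplitc (d :: t) with _ | ⟨h1, tl1⟩
      · exact absurd hsp (pvSplitc_ne_nil _)
      · have hh1 : ¬ (c = ' ' ∧ h1.head? = some ' ') := by
          rintro ⟨rfl, hh⟩
          by_cases hd : d = ','
          · subst hd
            rw [pvSplitcComma] at hsp
            cases hsp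
            simp at hh
          · rcases hq : pvSplitc t with _ | ⟨h2, tl2⟩
            · exact absurd hq (pvSplitc_ne_nil t)
            · rw [pvSplitcCons d t hd, hq] at hsp
              simp [pvAddHead] at hsp
              rw [← hsp.1] at hh
              simp at hh
              exact hm ⟨rfl, hh⟩
        rw [pvSplitcCons c _ hc, ih, hsp]
        rw [pvSplitcCons c (d :: t) hc, hsp]
        simp only [pvAddHead, List.map_cons, List.singleton_append]
        rw [show pvSqueeze (c :: h1) = c :: pvSqueeze h1 from by rw [pvSqueeze_cons, if_neg hh1]]

theorem pvFirstTok_head (v : List Char) (x : Char)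
    (h : ((pvSplitc v).headI).head? = some x) : v.head? = some x := by
  cases v with
  | nil => simp [pvSplitc] at h
  | cons c t =>
    by_cases hc : c = ','
    · subst hc; rw [pvSplitcComma] at h; simp at h
    · rcases hs : pvSplitc t with _ | ⟨h0, tl0⟩
      · exact absurd hs (pvSplitc_ne_nil t)
      · rw [pvSplitcCons c t hc, hs] at h
        simp [pvAddHead] at h
        simp [h]

theorem pvSplitcSingleton (t : List Char) (h0 : List Char) (h : pvSplitc t = [h0]) : h0 = t := by
  induction t generalizing h0 with
  | nil => simp [pvSplitc] at h; simp [h]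
  | cons c t' ih =>
    by_cases hc : c = ','
    · subst hc
      rw [pvSplitcComma] at h
      injection h with h1 h2
      exact absurd h2 (pvSplitc_ne_nil t')
    · rcases hs : pvSplitc t' with _ | ⟨h1, tl1⟩
      · exact absurd hs (pvSplitc_ne_nil t')
      · rw [pvSplitcCons c t' hc, hs] at h
        simp [pvAddHead] at h
        obtain ⟨hh, htl⟩ := h
        subst htl
        rw [← hh, ih h1 hs]

theorem pvGetLastCons {α : Type} (a : α) (l : List α) (h : l ≠ []) :
    (a :: l).getLast? = l.getLast? := by
  rcases l with _ | ⟨x, xs⟩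
  · exact absurd rfl h
  · exact List.getLast?_cons_cons

theorem pvLastTok (v : List Char) :
    ((pvSplitc v).getLast?.getD []) = [] ∨
      ((pvSplitc v).getLast?.getD []).getLast? = v.getLast? := by
  induction v with
  | nil => left; simp [pvSplitc]
  | cons c t ih =>
    by_cases hc : c = ','
    · subst hc
      cases t with
      | nil => left; simp [pvSplitc, pvAddHead]
      | cons d t' =>
        rw [pvSplitcComma]
        rw [pvGetLastCons _ _ (pvSplitc_ne_nil _)]
        rw [List.getLast?_cons_cons]
        exact ih
    · rcases hs : pvSplitc t with _ | ⟨h1, tl1⟩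
      · exact absurd hs (pvSplitc_ne_nil t)
      · rw [pvSplitcCons c t hc, hs]
        cases tl1 with
        | nil =>
          right
          simp only [pvAddHead, List.getLast?_singleton, Option.getD_some, List.singleton_append]
          rw [pvSplitcSingleton t h1 hs]
        | cons g gs =>
          have ht : t ≠ [] := by
            intro h0
            subst h0
            rw [show pvSplitc ([] : List Char) = [[]] from rfl] at hs
            simp at hs
          rw [show pvAddHead [c] (h1 :: g :: gs) = (c :: h1) :: g :: gs from rfl]
          rw [List.getLast?_cons_cons, ← List.getLast?_cons_cons (a := h1)]
          rw [← hs, pvGetLastCons c t ht]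
          exact ih

theorem pvDropLead_of_head (l : List Char) (h : l.head? ≠ some ' ') : pvDropLead l = l := by
  cases l with
  | nil => rfl
  | cons c t =>
    have hc : List.contains [' '] c = false := by
      rw [Bool.eq_false_iff]
      intro hq
      exact h (by simp [(pvSpIff c).mp hq])
    unfold pvDropLead
    rw [List.dropWhile_cons, hc]
    simp

theorem pvDropTrail_of_getLast (l : List Char) (h : l.getLast? ≠ some ' ') :
    pvDropTrail l = l := by
  unfold pvDropTrail
  rw [pvDropLead_of_head l.reverse (by rwa [List.head?_reverse]), List.reverse_reverse]

theorem pvHead?Append {α : Type} (l₁ l₂ : List α) (h : l₁ ≠ []) :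
    (l₁ ++ l₂).head? = l₁.head? := by
  cases l₁ <;> simp_all

theorem pvGetLast?Append {α : Type} (l₁ l₂ : List α) (h : l₂ ≠ []) :
    (l₁ ++ l₂).getLast? = l₂.getLast? := by
  induction l₁ with
  | nil => simp
  | cons a t iht =>
    rw [List.cons_append, pvGetLastCons _ _ (by simp [h]), iht]

theorem pvDropLead_getLast? (l : List Char) :
    pvDropLead l = [] ∨ (pvDropLead l).getLast? = l.getLast? := by
  rcases he : pvDropLead l with _ | ⟨c, t⟩
  · exact Or.inl rfl
  · right
    rw [← he]
    obtain ⟨pre, hpre⟩ := List.dropWhile_suffix (l := l) (fun c => List.contains [' '] c)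
    conv_rhs => rw [← hpre]
    rw [pvGetLast?Append pre _ (by rw [show List.dropWhile (fun c => List.contains [' '] c) l = pvDropLead l from rfl, he]; simp)]
    rfl

theorem pvDropTrail_ne_nil (l : List Char) (x : Char) (hx : l.head? = some x) (hs : x ≠ ' ') :
    pvDropTrail l ≠ [] := by
  intro hc
  unfold pvDropTrail pvDropLead at hc
  rw [List.reverse_eq_nil_iff, List.dropWhile_eq_nil_iff] at hc
  have hmem : x ∈ l.reverse := by
    rw [List.mem_reverse]
    rcases l with _ | ⟨y, ys⟩
    · simp at hx
    · simp only [List.head?_cons, Option.some.injEq] at hx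
      subst hx
      exact List.mem_cons_self
  exact hs ((pvSpIff x).mp (hc x hmem))

theorem pvDropTrail_cons (c : Char) (h : List Char) (hyp : c ≠ ' ' ∨ pvDropTrail h ≠ []) :
    pvDropTrail (c :: h) = c :: pvDropTrail h := by
  unfold pvDropTrail pvDropLead
  rw [List.reverse_cons, List.dropWhile_append]
  by_cases hnil : (List.dropWhile (fun c => List.contains [' '] c) h.reverse).isEmpty
  · rw [if_pos hnil]
    rw [List.isEmpty_iff] at hnil
    have hdt : pvDropTrail h = [] := by
      unfold pvDropTrail pvDropLead
      rw [hnil]; rfl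
    have hcs : c ≠ ' ' := by
      rcases hyp with h1 | h1
      · exact h1
      · exact absurd hdt h1
    have hq : List.contains [' '] c = false := by
      rw [Bool.eq_false_iff]
      intro hq
      exact hcs ((pvSpIff c).mp hq)
    rw [hnil, List.dropWhile_cons, hq]
    simp
  · rw [if_neg hnil]
    rw [List.reverse_append]
    rfl

theorem pvM1 (v : List Char) : ¬ [' ', ' '] <:+: v →
    pvSplitc (pvRep ',' ' ' ',' v) =
      (pvSplitc v).headI :: ((pvSplitc v).tail.map pvDropLead) := by
  fun_induction pvRep ',' ' ' ',' v with
  | case1 => intro h; simp [pvSplitc]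
  | case2 c =>
    intro h
    by_cases hc : c = ','
    · subst hc
      rw [pvSplitcComma]
      simp [pvSplitc, pvDropLead]
    · rw [pvSplitcCons c [] hc]
      simp [pvSplitc, pvAddHead]
  | case3 c d t hm ih =>
    obtain ⟨rfl, rfl⟩ := hm
    intro h
    have hnt : ¬ [' ', ' '] <:+: t := pvInfixTail _ _ _ _ (pvInfixTail _ _ _ _ h)
    have hth : t.head? ≠ some ' ' := by
      intro hth
      exact h ((pvPairInfix ' ' ' ' ',' _).mpr
        (Or.inr ((pvPairInfix ' ' ' ' ' ' t).mpr (Or.inl ⟨rfl, hth⟩))))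
    rcases hs : pvSplitc t with _ | ⟨h0, tl0⟩
    · exact absurd hs (pvSplitc_ne_nil t)
    · have hdl : pvDropLead h0 = h0 := by
        apply pvDropLead_of_head
        intro hcc
        exact hth (pvFirstTok_head t ' ' (by rw [hs]; simpa using hcc))
      rw [pvSplitcComma, ih hnt, hs]
      rw [pvSplitcComma, pvSplitcCons ' ' t (by decide), hs]
      simp only [pvAddHead, List.headI, List.tail, List.map_cons, List.singleton_append]
      rw [show pvDropLead (' ' :: h0) = pvDropLead h0 from by
        simp [pvDropLead, List.dropWhile_cons]]
      rw [hdl]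
  | case4 c d t hm ih =>
    intro h
    have hnd : ¬ [' ', ' '] <:+: (d :: t) := pvInfixTail _ _ _ _ h
    rcases hs : pvSplitc (d :: t) with _ | ⟨h1, tl1⟩
    · exact absurd hs (pvSplitc_ne_nil _)
    · by_cases hc : c = ','
      · subst hc
        have hd : d ≠ ' ' := by rintro rfl; exact hm ⟨rfl, rfl⟩
        have hdl : pvDropLead h1 = h1 := by
          apply pvDropLead_of_head
          intro hcc
          have := pvFirstTok_head (d :: t) ' ' (by rw [hs]; simpa using hcc)
          simp at this
          exact hd this
        rw [pvSplitcComma, ih hnd, hs]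
        rw [pvSplitcComma, hs]
        simp [hdl]
      · rw [pvSplitcCons c _ hc, ih hnd, hs]
        rw [pvSplitcCons c (d :: t) hc, hs]
        simp [pvAddHead]

theorem pvM2 (v : List Char) : ¬ [' ', ' '] <:+: v →
    pvSplitc (pvRep ' ' ',' ',' v) =
      ((pvSplitc v).dropLast.map pvDropTrail) ++ [(pvSplitc v).getLast?.getD []] := by
  fun_induction pvRep ' ' ',' ',' v with
  | case1 => intro h; simp [pvSplitc]
  | case2 c =>
    intro h
    by_cases hc : c = ','
    · subst hc
      rw [pvSplitcComma]
      simp [pvSplitc, pvDropTrail, pvDropLead]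
    · rw [pvSplitcCons c [] hc]
      simp [pvSplitc, pvAddHead]
  | case3 c d t hm ih =>
    obtain ⟨rfl, rfl⟩ := hm
    intro h
    have hnt : ¬ [' ', ' '] <:+: t := pvInfixTail _ _ _ _ (pvInfixTail _ _ _ _ h)
    rcases hs : pvSplitc t with _ | ⟨h0, tl0⟩
    · exact absurd hs (pvSplitc_ne_nil t)
    · rw [pvSplitcComma, ih hnt, hs]
      rw [pvSplitcCons ' ' (',' :: t) (by decide), pvSplitcComma, hs]
      rw [show pvAddHead [' '] ([] :: h0 :: tl0) = [' '] :: h0 :: tl0 from rfl]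
      rw [show ([' '] :: h0 :: tl0).dropLast = [' '] :: (h0 :: tl0).dropLast from rfl]
      rw [List.getLast?_cons_cons]
      simp only [List.map_cons, List.cons_append]
      rw [show pvDropTrail [' '] = [] from rfl]
  | case4 c d t hm ih =>
    intro h
    have hnd : ¬ [' ', ' '] <:+: (d :: t) := pvInfixTail _ _ _ _ h
    rcases hs : pvSplitc (d :: t) with _ | ⟨h1, tl1⟩
    · exact absurd hs (pvSplitc_ne_nil _)
    · by_cases hc : c = ','
      · subst hc
        rw [pvSplitcComma, ih hnd, hs]
        rw [pvSplitcComma, hs]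
        rw [show ([] :: h1 :: tl1).dropLast = [] :: (h1 :: tl1).dropLast from rfl]
        rw [List.getLast?_cons_cons]
        simp only [List.map_cons, List.cons_append]
        rw [show pvDropTrail [] = [] from rfl]
      · cases tl1 with
        | nil =>
          rw [pvSplitcCons c _ hc, ih hnd, hs]
          rw [pvSplitcCons c (d :: t) hc, hs]
          simp [pvAddHead]
        | cons g gs =>
          have hcnd : c ≠ ' ' ∨ pvDropTrail h1 ≠ [] := by
            by_cases hcs : c = ' '
            · right
              subst hcs
              have hd1 : d ≠ ',' := by rintro rfl; exact hm ⟨rfl, rfl⟩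
              have hd2 : d ≠ ' ' := by
                rintro rfl
                exact h ((pvPairInfix ' ' ' ' ' ' (' ' :: t)).mpr (Or.inl ⟨rfl, by simp⟩))
              have hh1 : h1.head? = some d := by
                rcases hq : pvSplitc t with _ | ⟨h2, tl2⟩
                · exact absurd hq (pvSplitc_ne_nil t)
                · rw [pvSplitcCons d t hd1, hq] at hs
                  simp [pvAddHead] at hs
                  rw [← hs.1]
                  simp
              exact pvDropTrail_ne_nil h1 d hh1 hd2
            · exact Or.inl hcs
          rw [pvSplitcCons c _ hc, ih hnd, hs]
          rw [pvSplitcCons c (d :: t) hc, hs]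
          rw [show (h1 :: g :: gs).dropLast = h1 :: (g :: gs).dropLast from rfl]
          rw [show pvAddHead [c] (h1 :: g :: gs) = (c :: h1) :: g :: gs from rfl]
          rw [show ((c :: h1) :: g :: gs).dropLast = (c :: h1) :: (g :: gs).dropLast from rfl]
          rw [List.getLast?_cons_cons]
          simp only [List.map_cons, List.cons_append, pvAddHead, List.singleton_append,
            List.nil_append]
          rw [pvDropTrail_cons c h1 hcnd]
          rw [pvGetLastCons (c :: h1) (g :: gs) (by simp)]

theorem pvStrip_head? (s : List Char) : (PySem.Chars.strip s).head? ≠ some ' ' := by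
  intro hc
  rw [PySem.Chars.strip, PySem.Chars.rstrip] at hc
  have hDne : (List.dropWhile PySem.Chars.isspace (PySem.Chars.lstrip s).reverse).reverse ≠ [] := by
    intro h0
    rw [h0] at hc
    simp at hc
  have hpre : (List.dropWhile PySem.Chars.isspace (PySem.Chars.lstrip s).reverse).reverse <+:
      PySem.Chars.lstrip s := by
    have h1 := List.dropWhile_suffix (l := (PySem.Chars.lstrip s).reverse) PySem.Chars.isspace
    have h2 := List.reverse_prefix.mpr h1
    rwa [List.reverse_reverse] at h2
  have hLhead : (PySem.Chars.lstrip s).head? = some ' ' := by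
    obtain ⟨tail, htail⟩ := hpre
    rw [← htail, pvHead?Append _ _ hDne]
    exact hc
  rw [PySem.Chars.lstrip] at hLhead
  have hmm := List.head?_dropWhile_not PySem.Chars.isspace s
  rw [hLhead] at hmm
  simp at hmm
  exact absurd hmm (by decide)

theorem pvStrip_getLast? (s : List Char) : (PySem.Chars.strip s).getLast? ≠ some ' ' := by
  intro hc
  rw [PySem.Chars.strip, PySem.Chars.rstrip] at hc
  rw [List.getLast?_reverse] at hc
  have hmm := List.head?_dropWhile_not PySem.Chars.isspace (PySem.Chars.lstrip s).reverse
  rw [hc] at hmm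
  simp at hmm
  exact absurd hmm (by decide)

theorem pvMapDropLast (f : List Char → List Char) (l : List (List Char)) :
    (l.map f).dropLast = l.dropLast.map f := by
  induction l with
  | nil => rfl
  | cons a t ih => cases t <;> simp_all

theorem pvGetLast?Map (f : List Char → List Char) (l : List (List Char)) :
    (l.map f).getLast? = l.getLast?.map f := by
  induction l with
  | nil => rfl
  | cons a t ih => cases t <;> simp_all

theorem pvTokens (x0 : List Char) (xt : List (List Char))
    (hx0 : pvDropLead x0 = x0)
    (hlast : ∀ g, (x0 :: xt).getLast? = some g → pvDropTrail (pvDropLead g) = pvDropLead g) :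
    ((x0 :: xt.map pvDropLead).dropLast.map pvDropTrail)
        ++ [(x0 :: xt.map pvDropLead).getLast?.getD []]
      = (x0 :: xt).map (fun t => pvDropTrail (pvDropLead t)) := by
  have h1 : x0 :: xt.map pvDropLead = (x0 :: xt).map pvDropLead := by simp [hx0]
  rw [h1, pvMapDropLast, pvGetLast?Map]
  have hne : (x0 :: xt) ≠ [] := by simp
  rcases hg : (x0 :: xt).getLast? with _ | g
  · simp at hg
  · simp only [Option.map_some, Option.getD_some]
    conv_rhs => rw [← List.dropLast_append_getLast hne]
    rw [List.map_append, List.map_map]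
    have hgl : (x0 :: xt).getLast hne = g := by
      have := List.getLast?_eq_getLast (l := x0 :: xt) hne
      rw [hg] at this
      exact (Option.some.injEq _ _).mp this.symm
    congr 1
    simp only [List.map_cons, List.map_nil, Function.comp, hgl]
    rw [hlast g hg]

-- A characterized: a map of normalize = dropTrail ∘ dropLead ∘ squeeze over the comma split.
theorem pvA_map (orgs : String) :
    parse_orgnizers_py orgs =
      (pvSplitc (PySem.Chars.strip orgs.toList)).map
        (fun t => String.mk (pvDropTrail (pvDropLead (pvSqueeze t)))) := by
  unfold parse_orgnizers_py
  simp only []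
  rw [pvLoop1_eq]
  have hnodd1 := pvNodd_squeeze (PySem.Chars.strip orgs.toList)
  rw [pvLoop2_eq _ hnodd1]
  have hnodd2 := pvNodd_repCS _ hnodd1
  rw [pvLoop3_eq _ hnodd2]
  rw [pvSplitOn_eq]
  rw [pvM2 _ hnodd2, pvM1 _ hnodd1]
  have hw1 : (pvSqueeze (PySem.Chars.strip orgs.toList)).head? ≠ some ' ' := by
    rw [pvSqueeze_head?]; exact pvStrip_head? orgs.toList
  have hw2 : (pvSqueeze (PySem.Chars.strip orgs.toList)).getLast? ≠ some ' ' := by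
    rw [pvSqueeze_getLast?]; exact pvStrip_getLast? orgs.toList
  rcases hX : pvSplitc (pvSqueeze (PySem.Chars.strip orgs.toList)) with _ | ⟨x0, xt⟩
  · exact absurd hX (pvSplitc_ne_nil _)
  have hx0 : pvDropLead x0 = x0 := by
    apply pvDropLead_of_head
    intro hcc
    exact hw1 (pvFirstTok_head _ ' ' (by rw [hX]; simpa using hcc))
  have hlast : ∀ g, (x0 :: xt).getLast? = some g →
      pvDropTrail (pvDropLead g) = pvDropLead g := by
    intro g hg
    have hLT := pvLastTok (pvSqueeze (PySem.Chars.strip orgs.toList))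
    rw [hX, hg] at hLT
    simp only [Option.getD_some] at hLT
    rcases hLT with hnil | hgl
    · subst hnil
      rfl
    · rcases pvDropLead_getLast? g with hdl | hdl
      · rw [hdl]; rfl
      · apply pvDropTrail_of_getLast
        rw [hdl, hgl]
        exact hw2
  simp only [List.headI_cons, List.tail_cons]
  rw [pvTokens x0 xt hx0 hlast]
  rw [← hX, pvSplitc_squeeze]
  simp only [List.map_map]
  rfl

-- ----- B side -----
-- pvScan's token processing, with the scan's state (accumulated token, pending flag).
def pvTokC : List Char → Bool → List Char → List Char
  | tok, _, [] => tok
  | tok, pending, c :: r =>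
    if c = ' ' then (if tok ≠ [] then pvTokC tok true r else pvTokC tok pending r)
    else if pending then pvTokC (tok ++ [' ', c]) false r
    else pvTokC (tok ++ [c]) false r

-- the same processing, state-free: inside a token (pvBody) / with a pending space (pvPend)
mutual
def pvBody : List Char → List Char
  | [] => []
  | c :: r => if c = ' ' then pvPend r else c :: pvBody r
def pvPend : List Char → List Char
  | [] => []
  | c :: r => if c = ' ' then pvPend r else ' ' :: c :: pvBody r
end

theorem pvScan_split (s : List Char) : ∀ (tok : List Char) (pending : Bool) (res : List String),
    pvScan s tok pending res =
      res ++ String.mk (pvTokC tok pending (pvSplitc s).headI)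
          :: ((pvSplitc s).tail.map (fun t => String.mk (pvTokC [] false t))) := by
  induction s with
  | nil =>
    intro tok pending res
    simp [pvScan, pvSplitc, pvTokC]
  | cons c rest ih =>
    intro tok pending res
    by_cases hc : c = ','
    · subst hc
      rw [show pvScan (',' :: rest) tok pending res
            = pvScan rest [] false (res ++ [String.mk tok]) from by simp [pvScan]]
      rw [ih, pvSplitcComma]
      rcases hs : pvSplitc rest with _ | ⟨h0, tl0⟩
      · exact absurd hs (pvSplitc_ne_nil rest)
      · simp [pvTokC]
    · rcases hs : pvSplitc rest with _ | ⟨h0, tl0⟩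
      · exact absurd hs (pvSplitc_ne_nil rest)
      · rw [pvSplitcCons c rest hc, hs]
        simp only [pvAddHead, List.singleton_append, List.headI_cons, List.tail_cons]
        by_cases hsp : c = ' '
        · subst hsp
          rw [show pvScan (' ' :: rest) tok pending res
                = (if tok ≠ [] then pvScan rest tok true res
                   else pvScan rest tok pending res) from by simp [pvScan]]
          rw [show pvTokC tok pending (' ' :: h0)
                = (if tok ≠ [] then pvTokC tok true h0 else pvTokC tok pending h0) from by
              simp [pvTokC]]
          by_cases htok : tok = []
          · simp only [htok]
            simp only [ne_eq, not_true_eq_false, if_false, ih, hs, List.headI_cons,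
              List.tail_cons]
          · simp only [ne_eq, htok, not_false_eq_true, if_true, ih, hs, List.headI_cons,
              List.tail_cons]
        · rw [show pvScan (c :: rest) tok pending res
                = (if pending then pvScan rest (tok ++ [' ', c]) false res
                   else pvScan rest (tok ++ [c]) false res) from by simp [pvScan, hc, hsp]]
          rw [show pvTokC tok pending (c :: h0)
                = (if pending then pvTokC (tok ++ [' ', c]) false h0
                   else pvTokC (tok ++ [c]) false h0) from by simp [pvTokC, hsp]]
          cases pending
          · simp only [if_false, Bool.false_eq_true, ih, hs, List.headI_cons, List.tail_cons]
          · simp only [if_true, ih, hs, List.headI_cons, List.tail_cons]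

theorem pvTokC_state (r : List Char) : ∀ tok : List Char, tok ≠ [] →
    pvTokC tok false r = tok ++ pvBody r ∧ pvTokC tok true r = tok ++ pvPend r := by
  induction r with
  | nil => intro tok _; simp [pvTokC, pvBody, pvPend]
  | cons c r ih =>
    intro tok htok
    by_cases hsp : c = ' '
    · subst hsp
      constructor
      · rw [show pvTokC tok false (' ' :: r) = pvTokC tok true r from by simp [pvTokC, htok]]
        rw [(ih tok htok).2]
        rw [show pvBody (' ' :: r) = pvPend r from by simp [pvBody]]
      · rw [show pvTokC tok true (' ' :: r) = pvTokC tok true r from by simp [pvTokC, htok]]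
        rw [(ih tok htok).2]
        rw [show pvPend (' ' :: r) = pvPend r from by simp [pvPend]]
    · constructor
      · rw [show pvTokC tok false (c :: r) = pvTokC (tok ++ [c]) false r from by
            simp [pvTokC, hsp]]
        rw [(ih (tok ++ [c]) (by simp)).1]
        rw [show pvBody (c :: r) = c :: pvBody r from by simp [pvBody, hsp]]
        simp
      · rw [show pvTokC tok true (c :: r) = pvTokC (tok ++ [' ', c]) false r from by
            simp [pvTokC, hsp]]
        rw [(ih (tok ++ [' ', c]) (by simp)).1]
        rw [show pvPend (c :: r) = ' ' :: c :: pvBody r from by simp [pvPend, hsp]]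
        simp
  termination_by r => r.length

theorem pvBodyPend_norm (n : Nat) : ∀ u : List Char, u.length ≤ n →
    pvBody u = pvDropTrail (pvSqueeze u) ∧ pvPend u = pvDropTrail (pvSqueeze (' ' :: u)) := by
  induction n with
  | zero =>
    intro u hu
    have : u = [] := by cases u <;> simp_all
    subst this
    constructor <;> rfl
  | succ n ih =>
    intro u hu
    cases u with
    | nil => constructor <;> rfl
    | cons c r =>
      have hr : r.length ≤ n := by simp at hu; omega
      by_cases hsp : c = ' '
      · subst hsp
        constructor
        · rw [show pvBody (' ' :: r) = pvPend r from by simp [pvBody]]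
          exact (ih r hr).2
        · rw [show pvPend (' ' :: r) = pvPend r from by simp [pvPend]]
          rw [(ih r hr).2]
          rw [show pvSqueeze (' ' :: ' ' :: r) = pvSqueeze (' ' :: r) from by simp [pvSqueeze]]
      · have hbody : pvBody (c :: r) = pvDropTrail (pvSqueeze (c :: r)) := by
          rw [show pvBody (c :: r) = c :: pvBody r from by simp [pvBody, hsp]]
          rw [(ih r hr).1]
          rw [pvSqueeze_cons, if_neg (by simp [hsp])]
          rw [pvDropTrail_cons c _ (Or.inl hsp)]
        refine ⟨hbody, ?_⟩
        rw [show pvPend (c :: r) = ' ' :: c :: pvBody r from by simp [pvPend, hsp]]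
        rw [pvSqueeze_cons ' ' (c :: r), if_neg (by simp [hsp])]
        have hne : pvDropTrail (pvSqueeze (c :: r)) ≠ [] := by
          apply pvDropTrail_ne_nil _ c _ hsp
          rw [pvSqueeze_head?]; simp
        rw [pvDropTrail_cons ' ' _ (Or.inr hne), ← hbody]
        rw [show pvBody (c :: r) = c :: pvBody r from by simp [pvBody, hsp]]

theorem pvTokC_norm (t : List Char) :
    pvTokC [] false t = pvDropTrail (pvSqueeze (pvDropLead t)) := by
  induction t with
  | nil => rfl
  | cons c r ih =>
    by_cases hsp : c = ' '
    · subst hsp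
      rw [show pvTokC [] false (' ' :: r) = pvTokC [] false r from by simp [pvTokC]]
      rw [ih]
      rw [show pvDropLead (' ' :: r) = pvDropLead r from by
        simp [pvDropLead, List.dropWhile_cons]]
    · rw [show pvTokC [] false (c :: r) = pvTokC [c] false r from by simp [pvTokC, hsp]]
      rw [(pvTokC_state r [c] (by simp)).1]
      rw [(pvBodyPend_norm r.length r le_rfl).1]
      rw [pvDropLead_of_head (c :: r) (by simp [hsp])]
      rw [pvSqueeze_cons, if_neg (by simp [hsp])]
      rw [pvDropTrail_cons c _ (Or.inl hsp)]
      rfl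

theorem pvDropLead_squeeze (t : List Char) :
    pvDropLead (pvSqueeze t) = pvSqueeze (pvDropLead t) := by
  induction t with
  | nil => rfl
  | cons c r ih =>
    by_cases hsp : c = ' '
    · subst hsp
      rw [show pvDropLead (' ' :: r) = pvDropLead r from by
        simp [pvDropLead, List.dropWhile_cons]]
      rw [pvSqueeze_cons]
      by_cases hh : r.head? = some ' '
      · rw [if_pos ⟨rfl, hh⟩, ih]
      · rw [if_neg (by simp [hh])]
        rw [show pvDropLead (' ' :: pvSqueeze r) = pvDropLead (pvSqueeze r) from by
          simp [pvDropLead, List.dropWhile_cons]]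
        exact ih
    · rw [pvSqueeze_cons, if_neg (by simp [hsp])]
      rw [pvDropLead_of_head (c :: pvSqueeze r) (by simp [hsp])]
      rw [pvDropLead_of_head (c :: r) (by simp [hsp])]
      rw [pvSqueeze_cons, if_neg (by simp [hsp])]

-- B characterized: the same map of normalize over the comma split.
theorem pvB_map (orgs : String) :
    parse_orgnizers_py_alt orgs =
      (pvSplitc (PySem.Chars.strip orgs.toList)).map
        (fun t => String.mk (pvDropTrail (pvDropLead (pvSqueeze t)))) := by
  unfold parse_orgnizers_py_alt
  rw [pvScan_split]
  rcases hX : pvSplitc (PySem.Chars.strip orgs.toList) with _ | ⟨x0, xt⟩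
  · exact absurd hX (pvSplitc_ne_nil _)
  simp only [List.headI_cons, List.tail_cons, List.nil_append, List.map_cons]
  have hnorm : ∀ t : List Char,
      String.mk (pvTokC [] false t) = String.mk (pvDropTrail (pvDropLead (pvSqueeze t))) := by
    intro t
    rw [pvTokC_norm, pvDropLead_squeeze]
  rw [hnorm x0]
  congr 1
  exact List.map_congr_left (fun t _ => hnorm t)

-- ===== VERDICT (by name: the statement is the Claim_ definition above) =====
theorem parse_orgnizers_py_spec : Claim_equal_parse_orgnizers_py := by
  intro orgs _
  unfold Spec_parse_orgnizers_py
  rw [pvA_map, pvB_map]
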